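-- pv_equiv track=rewrite | github.com/BigSlikTobi/tackle_4_loss_intelligence | src/functions/data_loading/core/standings/compute.py | _format_streak
-- ===== SOURCE A (Python) =====
-- from typing import Any, Dict, Iterable, List, Optional, Sequence, Tuple
--
-- def _format_streak(game_log: Sequence[Tuple[str, int]]) -> str:
--     if not game_log:
--         return ""
--     last_outcome = game_log[-1][0]
--     n = 0
--     for o, _ in reversed(game_log):
--         if o == last_outcome:
--             n += 1
--         else:
--             break
--     return f"{last_outcome}{n}"
-- ===== SOURCE B (Python) =====
-- def _format_streak(game_log):
--     cur = None
--     cnt = 0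
--     for o, _ in game_log:
--         if o == cur:
--             cnt += 1
--         else:
--             cur = o
--             cnt = 1
--     if cur is None:
--         return ""
--     return f"{cur}{cnt}"
-- ===== Notes on version B (the rewrite author's own statement) =====
-- stated objective: alternative
-- what changed: Replaces the reversed scan with an early break by a single forward pass that resets a (current outcome, count) pair on every outcome change, so the final state is the trailing streak.
import Mathlib
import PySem

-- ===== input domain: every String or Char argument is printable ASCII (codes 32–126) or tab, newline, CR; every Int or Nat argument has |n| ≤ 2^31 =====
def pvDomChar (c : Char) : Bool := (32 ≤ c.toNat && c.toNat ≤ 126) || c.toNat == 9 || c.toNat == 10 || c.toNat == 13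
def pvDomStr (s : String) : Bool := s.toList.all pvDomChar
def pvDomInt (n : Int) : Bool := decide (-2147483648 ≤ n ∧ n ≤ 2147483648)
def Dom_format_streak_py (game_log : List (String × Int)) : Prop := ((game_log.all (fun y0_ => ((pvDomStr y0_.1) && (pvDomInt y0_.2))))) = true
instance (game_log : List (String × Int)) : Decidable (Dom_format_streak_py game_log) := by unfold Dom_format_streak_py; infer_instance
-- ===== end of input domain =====

-- B replaces A's reversed scan with early break by a forward pass whose (outcome, count) state resets on change (alternative decomposition; return value only).

-- ===== PORT A =====
-- the 'for o, _ in reversed(game_log)' loop with its break: stops at the first outcome ≠ last_outcome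
def pvLoopA : List (String × Int) → String → Int → Int
  | [], _, n => n
  | (o, _) :: rest, lo, n => if o == lo then pvLoopA rest lo (n + 1) else n

def format_streak_py (game_log : List (String × Int)) : String :=
  match game_log.getLast? with          -- 'if not game_log: return ""' + 'game_log[-1]'
  | none => ""
  | some last =>
    let last_outcome := last.1
    let n := pvLoopA game_log.reverse last_outcome 0
    last_outcome ++ PySem.Int.toStr n

-- ===== PORT B =====
-- one forward step: same outcome increments the count, a new outcome resets it to 1
def pvStepB : Option (String × Int) → (String × Int) → Option (String × Int)
  | some (cur, cnt), (o, _) => if o == cur then some (cur, cnt + 1) else some (o, 1)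
  | none, (o, _) => some (o, 1)

def format_streak_py_alt (game_log : List (String × Int)) : String :=
  match game_log.foldl pvStepB none with
  | none => ""
  | some (cur, cnt) => cur ++ PySem.Int.toStr cnt

-- ===== PRECONDITION & SPEC =====
def Spec_format_streak_py (game_log : List (String × Int)) (out : String) : Prop := out = format_streak_py_alt game_log
instance (game_log : List (String × Int)) (out : String) : Decidable (Spec_format_streak_py game_log out) := by unfold Spec_format_streak_py; infer_instance

-- ===== CLAIM (what is proved, stated in full; the proofs are below) =====
def Claim_equal_format_streak_py : Prop := ∀ (game_log : List (String × Int)), Dom_format_streak_py game_log → Spec_format_streak_py game_log (format_streak_py game_log)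

-- ===== LEMMAS AND PROOFS =====

-- length of the maximal prefix whose outcome is lo
def pvRun : List (String × Int) → String → Int
  | [], _ => 0
  | (o, _) :: rest, lo => if o == lo then pvRun rest lo + 1 else 0

theorem pvLoopA_eq_run (r : List (String × Int)) (lo : String) (n : Int) :
    pvLoopA r lo n = n + pvRun r lo := by
  induction r generalizing n with
  | nil => simp [pvLoopA, pvRun]
  | cons h t ih =>
    obtain ⟨o, x⟩ := h
    by_cases ho : o == lo <;> simp [pvLoopA, pvRun, ho, ih] <;> ring

theorem pvRun_head_ne (p : String × Int) (rest : List (String × Int)) (lo : String)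
    (h : p.1 ≠ lo) : pvRun (p :: rest) lo = 0 := by
  obtain ⟨o, x⟩ := p
  simp at h
  simp [pvRun, h]

theorem pvFoldB_char (l : List (String × Int)) :
    l.foldl pvStepB none =
      l.getLast?.map (fun last => (last.1, pvRun l.reverse last.1)) := by
  induction l using List.reverseRecOn with
  | nil => simp
  | append_singleton l x ih =>
    rw [List.foldl_append, ih]
    cases hl : l.getLast? with
    | none =>
      have : l = [] := List.getLast?_eq_none_iff.mp hl
      subst this
      simp [pvStepB, pvRun]
    | some last =>
      have hne : l ≠ [] := by
        intro h; subst h; simp at hl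
      have hrev : l.reverse = last :: l.reverse.tail := by
        have h1 : l.reverse.head? = some last := by
          rw [List.head?_reverse]; exact hl
        cases hr : l.reverse with
        | nil => rw [hr] at h1; simp at h1
        | cons a t => rw [hr] at h1; simp at h1; simp [h1]
      obtain ⟨o, xv⟩ := x
      have hgl : (l ++ [(o, xv)]).getLast? = some (o, xv) := List.getLast?_concat
      rw [hgl, List.reverse_append]
      by_cases ho : o == last.1
      · have hoeq : o = last.1 := by simpa using ho
        subst hoeq
        simp [pvStepB, pvRun]
      · have honeq : o ≠ last.1 := by simpa using ho
        have h0 : pvRun l.reverse o = 0 := by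
          rw [hrev]; exact pvRun_head_ne _ _ _ (Ne.symm honeq)
        simp [pvStepB, pvRun, ho, h0]

-- ===== VERDICT (by name: the statement is the Claim_ definition above) =====
theorem format_streak_py_spec : Claim_equal_format_streak_py := by
  intro game_log _
  unfold Spec_format_streak_py format_streak_py format_streak_py_alt
  rw [pvFoldB_char]
  cases hl : game_log.getLast? with
  | none => simp
  | some last => simp [pvLoopA_eq_run]
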